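-- pv_equiv track=rewrite | github.com/eolandro/IA2025 | purpura/Unidad 3/comesolo.py | generarTableroInicial
-- ===== SOURCE A (Python) =====
-- def generarTableroInicial(inicio):
--     tablero = []
--     cont = 0
--     for i in range(5):
--         tablero.append([])
--         for j in range(i+1):
--             if inicio == cont:
--                 tablero[i].append(0)
--             else:
--                 tablero[i].append(1)
--             cont += 1
--     return tablero
-- ===== SOURCE B (Python) =====
-- def generarTableroInicial(inicio):
--     tablero = []
--     for i in range(5):
--         fila = [1] * (i + 1)
--         offset = i * (i + 1) // 2
--         if offset <= inicio <= offset + i: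
--             fila[inicio - offset] = 0
--         tablero.append(fila)
--     return tablero
-- ===== Notes on version B (the rewrite author's own statement) =====
-- stated objective: alternative
-- what changed: Replaces the per-cell running counter and equality test at every cell with per-row arithmetic: each row starts as [1]*(i+1) and the 0 is placed directly at column inicio - i*(i+1)//2 when inicio falls in that row's offset interval.
import Mathlib
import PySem

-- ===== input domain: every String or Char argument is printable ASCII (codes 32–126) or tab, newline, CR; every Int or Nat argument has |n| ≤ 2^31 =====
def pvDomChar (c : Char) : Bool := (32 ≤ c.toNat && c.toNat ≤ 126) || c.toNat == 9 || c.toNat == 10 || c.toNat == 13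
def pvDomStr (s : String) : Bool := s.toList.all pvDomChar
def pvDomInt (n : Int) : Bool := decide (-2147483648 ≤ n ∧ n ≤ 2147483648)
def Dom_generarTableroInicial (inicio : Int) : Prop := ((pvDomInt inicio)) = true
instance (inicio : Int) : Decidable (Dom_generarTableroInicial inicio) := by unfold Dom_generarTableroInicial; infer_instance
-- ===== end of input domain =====

-- ===== PORT A =====
-- B builds each row as ones and places the 0 arithmetically via the row's offset, instead of A's per-cell counter scan.
def generarTableroInicial (inicio : Int) : List (List Int) :=
  -- state = (tablero, cont); tablero.append([]) then inner loop appends to tablero[i] (= last row)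
  (((PySem.List.pyRange 0 5 1).foldl (fun (st : List (List Int) × Int) i =>
      let st := (st.1 ++ [([] : List Int)], st.2)
      (PySem.List.pyRange 0 (i + 1) 1).foldl (fun (st' : List (List Int) × Int) _j =>
        let v : Int := if inicio == st'.2 then 0 else 1
        (st'.1.dropLast ++ [st'.1.getLast! ++ [v]], st'.2 + 1)) st)
    ([], 0))).1

-- ===== PORT B =====
def generarTableroInicial_alt (inicio : Int) : List (List Int) :=
  (PySem.List.pyRange 0 5 1).foldl (fun (tablero : List (List Int)) i =>
    let fila : List Int := List.replicate (i + 1).toNat 1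
    let offset : Int := PySem.Int.floordiv (i * (i + 1)) 2
    let fila := if offset ≤ inicio ∧ inicio ≤ offset + i then fila.set (inicio - offset).toNat 0 else fila
    tablero ++ [fila]) []

-- ===== PRECONDITION & SPEC =====
def Spec_generarTableroInicial (inicio : Int) (out : List (List Int)) : Prop := out = generarTableroInicial_alt inicio
instance (inicio : Int) (out : List (List Int)) : Decidable (Spec_generarTableroInicial inicio out) := by unfold Spec_generarTableroInicial; infer_instance

-- ===== CLAIM (what is proved, stated in full; the proofs are below) =====
def Claim_equal_generarTableroInicial : Prop := ∀ (inicio : Int), Dom_generarTableroInicial inicio → Spec_generarTableroInicial inicio (generarTableroInicial inicio)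

-- ===== LEMMAS AND PROOFS =====

-- ===== VERDICT (by name: the statement is the Claim_ definition above) =====
set_option maxHeartbeats 1000000 in
theorem generarTableroInicial_spec : Claim_equal_generarTableroInicial := by
  intro inicio _
  unfold Spec_generarTableroInicial
  by_cases h : 0 ≤ inicio ∧ inicio ≤ 14
  · obtain ⟨h1, h2⟩ := h
    interval_cases inicio <;> decide
  · simp only [generarTableroInicial, generarTableroInicial_alt, PySem.List.pyRange,
      PySem.Int.floordiv] at *
    have h2 : (Int.toNat 2) = 2 := rfl
    have h3 : (Int.toNat 3) = 3 := rfl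
    have h4 : (Int.toNat 4) = 4 := rfl
    have h5 : (Int.toNat 5) = 5 := rfl
    have f3 : Int.fdiv 6 2 = 3 := rfl
    have f6 : Int.fdiv 12 2 = 6 := rfl
    have f10 : Int.fdiv 20 2 = 10 := rfl
    norm_num [h2, h3, h4, h5, List.range_succ]
    simp only [f3, f6, f10]
    refine ⟨?_, ?_, ?_, ?_, ?_⟩ <;> (split_ifs <;> first | rfl | omega)
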